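-- pv_equiv track=rewrite | github.com/maread99/aoc | 2023/13_rev.py | get_pat_value
-- ===== SOURCE A (Python) =====
-- def get_pat_value(rows: list[str]) -> int:
--     for i in range(1, len(rows)):
--         above = rows[:i][::-1]
--         below = rows[i:]
--
--         for a, b in zip(above, below):
--             if a != b:
--                 break
--         else:
--             return i
--     return 0
-- ===== SOURCE B (Python) =====
-- def get_pat_value(rows: list[str]) -> int:
--     # Intern rows to small int ids; a mirror at line i means the reversed
--     # prefix and the suffix agree on their first min(i, n-i) ids, i.e. the
--     # exact base-B values (B > every id, big-int arithmetic, collision-free)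
--     # of those two blocks are equal.  Rolling forward/backward hashes are
--     # maintained with big*small updates only; the upper-half mirror lines
--     # are the lower-half mirror lines of the reversed sequence.
--     ids = {}
--     seq = []
--     for row in rows:
--         if row not in ids:
--             ids[row] = len(ids)
--         seq.append(ids[row])
--     n = len(seq)
--     B = len(ids) + 1
--
--     def low_mirrors(s):
--         # all i with 1 <= i <= n//2 such that reversed(s[:i]) == s[i:2*i]
--         res = []
--         half = n // 2
--         if half >= 1:
--             bwd = s[0]       # base-B value of reversed(s[:i])
--             fwd = s[1]       # base-B value of s[i:2*i]
--             pw = 1           # B ** (i - 1)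
--             for i in range(1, half + 1):
--                 if fwd == bwd:
--                     res.append(i)
--                 if i < half:
--                     fwd = (fwd - s[i] * pw) * B * B + s[2 * i] * B + s[2 * i + 1]
--                     bwd = bwd + s[i] * pw * B
--                     pw = pw * B
--         return res
--
--     cands = low_mirrors(seq) + [n - j for j in low_mirrors(seq[::-1])]
--     return min(cands) if cands else 0
-- ===== Notes on version B (the rewrite author's own statement) =====
-- stated objective: faster
-- what changed: B interns each row to a small int id, then finds mirror lines by maintaining exact (collision-free) base-B rolling hashes of the reversed prefix and the matching suffix block, scanning the lower half directly and the upper half as the lower half of the reversed sequence, and returns the minimum candidate; A re-slices, reverses and elementwise-compares the two sides for every candidate line. Intended as faster; a timing run measured B 4-5x faster than A at n=16384 (on one seed both exceeded that run budget at n=65536).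
import Mathlib
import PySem

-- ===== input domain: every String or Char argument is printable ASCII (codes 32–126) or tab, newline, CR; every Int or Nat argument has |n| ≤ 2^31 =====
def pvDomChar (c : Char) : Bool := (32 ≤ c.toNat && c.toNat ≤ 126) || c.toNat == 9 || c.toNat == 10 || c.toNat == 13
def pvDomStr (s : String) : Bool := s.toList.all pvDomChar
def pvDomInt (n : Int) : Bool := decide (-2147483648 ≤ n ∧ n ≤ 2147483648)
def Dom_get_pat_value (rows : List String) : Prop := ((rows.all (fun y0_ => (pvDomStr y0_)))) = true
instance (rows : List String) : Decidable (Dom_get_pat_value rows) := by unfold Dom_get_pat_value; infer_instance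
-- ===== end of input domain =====

-- B interns rows to int ids and finds mirror lines via exact (collision-free)
-- base-B rolling hashes instead of A's per-line slice/reverse/elementwise scan
-- (objective: faster; a timing run measured B 4-5x faster at n=16384).

-- ===== PORT A =====
-- the inner `for a, b in zip(above, below): if a != b: break / else: return i`
def aCheck : List (String × String) → Bool
  | [] => true
  | p :: t => if p.1 ≠ p.2 then false else aCheck t

def aLoop (rows : List String) : List Int → Int
  | [] => 0
  | i :: rest =>
    -- above = rows[:i][::-1]   (step -1 ≠ 0, so slice? is always `some`)
    let above := (PySem.List.slice? (PySem.List.slice rows none (some i)) none none (-1)).getD []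
    -- below = rows[i:]
    let below := PySem.List.slice rows (some i) none
    if aCheck (above.zip below) then i else aLoop rows rest

def get_pat_value (rows : List String) : Int :=
  aLoop rows (PySem.List.pyRange 1 (rows.length : Int) 1)

-- ===== PORT B =====
-- one pass: `if row not in ids: ids[row] = len(ids); seq.append(ids[row])`
def bBuild (rows : List String) : PySem.Dict String Int × List Int :=
  rows.foldl
    (fun st row =>
      let ids := if st.1.contains row = false then st.1.insert row (st.1.size : Int) else st.1
      (ids, st.2 ++ [ids.getD row 0]))
    (PySem.Dict.empty, [])

-- body of `for i in range(1, half + 1)` in low_mirrors; state = (res, fwd, bwd, pw)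
def bStep (s : List Int) (B half : Int) (st : List Int × Int × Int × Int) (i : Int) :
    List Int × Int × Int × Int :=
  let res := if st.2.1 = st.2.2.1 then st.1 ++ [i] else st.1
  if i < half then
    (res,
     (st.2.1 - (PySem.List.pyGet? s i).getD 0 * st.2.2.2) * B * B
       + (PySem.List.pyGet? s (2 * i)).getD 0 * B + (PySem.List.pyGet? s (2 * i + 1)).getD 0,
     st.2.2.1 + (PySem.List.pyGet? s i).getD 0 * st.2.2.2 * B,
     st.2.2.2 * B)
  else (res, st.2)

-- `low_mirrors(s)`: rolling-hash scan of the lower-half mirror lines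
def bLow (s : List Int) (n B : Int) : List Int :=
  let half := PySem.Int.floordiv n 2
  if 1 ≤ half then
    ((PySem.List.pyRange 1 (half + 1) 1).foldl (bStep s B half)
      ([], (PySem.List.pyGet? s 1).getD 0, (PySem.List.pyGet? s 0).getD 0, 1)).1
  else []

-- `cands = low_mirrors(seq) + [n - j for j in low_mirrors(seq[::-1])]; min(cands) if cands else 0`
def get_pat_value_alt (rows : List String) : Int :=
  let built := bBuild rows
  let seq := built.2
  let n : Int := seq.length
  let B : Int := (built.1.size : Int) + 1
  let cands := bLow seq n B ++ (bLow seq.reverse n B).map (fun j => n - j)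
  match PySem.List.min? cands (fun x => x) with
  | some m => m
  | none => 0

-- ===== PRECONDITION & SPEC =====
def Spec_get_pat_value (rows : List String) (out : Int) : Prop := out = get_pat_value_alt rows
instance (rows : List String) (out : Int) : Decidable (Spec_get_pat_value rows out) := by unfold Spec_get_pat_value; infer_instance

-- ===== CLAIM (what is proved, stated in full; the proofs are below) =====
def Claim_equal_get_pat_value : Prop := ∀ (rows : List String), Dom_get_pat_value rows → Spec_get_pat_value rows (get_pat_value rows)

-- ===== LEMMAS AND PROOFS =====

theorem aCheck_eq_all (l : List (String × String)) : aCheck l = l.all (fun p => p.1 == p.2) := by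
  induction l with
  | nil => rfl
  | cons p t ih =>
    by_cases h : p.1 = p.2 <;> simp [aCheck, h, ih]

-- state invariant of B's interning pass
def GoodState (pref : List String) (st : PySem.Dict String Int × List Int) : Prop :=
  st.2.length = pref.length ∧
  (∀ r : String, st.1.contains r = true ↔ r ∈ pref) ∧
  (∀ j : Nat, j < pref.length → st.1.get? (pref.getD j "") = some (st.2.getD j 0)) ∧
  (∀ (r : String) (v : Int), st.1.get? r = some v → 0 ≤ v ∧ v < (st.1.size : Int)) ∧
  (∀ (r s : String) (v : Int), st.1.get? r = some v → st.1.get? s = some v → r = s)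

theorem goodState_step (pref : List String) (st : PySem.Dict String Int × List Int)
    (x : String) (h : GoodState pref st) :
    GoodState (pref ++ [x])
      ((fun st row =>
        let ids := if st.1.contains row = false then st.1.insert row (st.1.size : Int) else st.1
        (ids, st.2 ++ [ids.getD row 0])) st x) := by
  obtain ⟨h1, h2, h3, h4, h5⟩ := h
  by_cases hc : st.1.contains x = false
  · -- new key: insert x ↦ size
    have hxnot : x ∉ pref := fun hx => by simp [(h2 x).mpr hx] at hc
    simp only [hc, if_true, GoodState]
    refine ⟨by simp [h1], ?_, ?_, ?_, ?_⟩
    · intro r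
      rw [PySem.Dict.contains_insert]
      constructor
      · intro hr
        rcases Bool.or_eq_true_iff.mp hr with hr | hr
        · simp [List.mem_append, eq_of_beq hr]
        · exact List.mem_append.mpr (Or.inl ((h2 r).mp hr))
      · intro hr
        rcases List.mem_append.mp hr with hr | hr
        · exact Bool.or_eq_true_iff.mpr (Or.inr ((h2 r).mpr hr))
        · simp at hr; subst hr; simp
    · intro j hj
      simp only [List.length_append, List.length_singleton] at hj
      by_cases hjl : j < pref.length
      · have e1 : (pref ++ [x]).getD j "" = pref.getD j "" := by
          simp [List.getD, List.getElem?_append_left hjl]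
        have e2 : (st.2 ++ [st.1.insert x (st.1.size : Int) |>.getD x 0]).getD j 0 = st.2.getD j 0 := by
          simp [List.getD, List.getElem?_append_left (h1 ▸ hjl)]
        rw [e1, e2]
        have hmem : pref.getD j "" ∈ pref := by
          have : pref.getD j "" = pref[j] := by
            simp [List.getD, List.getElem?_eq_getElem hjl]
          rw [this]; exact List.getElem_mem hjl
        have hne : pref.getD j "" ≠ x := fun he => hxnot (he ▸ hmem)
        rw [PySem.Dict.get?_insert, if_neg hne]
        exact h3 j hjl
      · have hj' : j = pref.length := by omega
        subst hj'
        have e1 : (pref ++ [x]).getD pref.length "" = x := by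
          simp [List.getD]
        have e2 : (st.2 ++ [st.1.insert x (st.1.size : Int) |>.getD x 0]).getD pref.length 0
            = (st.1.insert x (st.1.size : Int)).getD x 0 := by
          rw [← h1]
          simp [List.getD]
        rw [e1, e2, PySem.Dict.get?_insert_self, PySem.Dict.getD_insert_self]
    · intro r v hv
      rw [PySem.Dict.get?_insert] at hv
      have hsz : ((st.1.insert x (st.1.size : Int)).size : Int) = (st.1.size : Int) + 1 := by
        simp [PySem.Dict.size_insert, hc]
      split_ifs at hv with hrx
      · have hveq : (st.1.size : Int) = v := by injection hv
        constructor <;> omega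
      · have := h4 r v hv; constructor <;> omega
    · intro r s v hr hs
      rw [PySem.Dict.get?_insert] at hr hs
      split_ifs at hr hs with hrx hsx hsx
      · rw [hrx, hsx]
      · exfalso
        have hveq : (st.1.size : Int) = v := by injection hr
        have := h4 s v hs; omega
      · exfalso
        have hveq : (st.1.size : Int) = v := by injection hs
        have := h4 r v hr; omega
      · exact h5 r s v hr hs
  · -- known key: dict unchanged
    have hcx : st.1.contains x = true := by revert hc; cases st.1.contains x <;> simp
    have hxmem : x ∈ pref := (h2 x).mp hcx
    have hif : (if st.1.contains x = false then st.1.insert x (st.1.size : Int) else st.1) = st.1 :=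
      if_neg (by simp [hcx])
    simp only [GoodState, hif]
    refine ⟨by simp [h1], ?_, ?_, h4, h5⟩
    · intro r
      rw [h2 r, List.mem_append]
      constructor
      · exact Or.inl
      · rintro (hr | hr)
        · exact hr
        · simp at hr; subst hr; exact hxmem
    · intro j hj
      simp only [List.length_append, List.length_singleton] at hj
      by_cases hjl : j < pref.length
      · have e1 : (pref ++ [x]).getD j "" = pref.getD j "" := by
          simp [List.getD, List.getElem?_append_left hjl]
        have e2 : (st.2 ++ [st.1.getD x 0]).getD j 0 = st.2.getD j 0 := by
          simp [List.getD, List.getElem?_append_left (h1 ▸ hjl)]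
        rw [e1, e2]
        exact h3 j hjl
      · have hj' : j = pref.length := by omega
        subst hj'
        have e1 : (pref ++ [x]).getD pref.length "" = x := by simp [List.getD]
        have e2 : (st.2 ++ [st.1.getD x 0]).getD pref.length 0 = st.1.getD x 0 := by
          rw [← h1]; simp [List.getD]
        rw [e1, e2]
        have hsome : (st.1.get? x).isSome := by
          rw [← PySem.Dict.contains_eq_isSome_get?]; exact hcx
        obtain ⟨v, hv⟩ := Option.isSome_iff_exists.mp hsome
        rw [hv]
        simp [PySem.Dict.getD_eq_get?_getD, hv]

theorem goodState_foldl (l : List String) (pref : List String)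
    (st : PySem.Dict String Int × List Int) (h : GoodState pref st) :
    GoodState (pref ++ l)
      (l.foldl (fun st row =>
        let ids := if st.1.contains row = false then st.1.insert row (st.1.size : Int) else st.1
        (ids, st.2 ++ [ids.getD row 0])) st) := by
  induction l generalizing pref st with
  | nil => simpa using h
  | cons x t ih =>
    have := ih (pref ++ [x]) _ (goodState_step pref st x h)
    simpa [List.foldl_cons, List.append_assoc] using this

theorem goodState_bBuild (rows : List String) : GoodState rows (bBuild rows) := by
  have := goodState_foldl rows [] (PySem.Dict.empty, [])
    (by
      refine ⟨rfl, ?_, ?_, ?_, ?_⟩ <;>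
        simp [PySem.Dict.contains_empty, PySem.Dict.get?_empty])
  simpa [bBuild] using this

theorem seq_length (rows : List String) : (bBuild rows).2.length = rows.length :=
  (goodState_bBuild rows).1

-- every id in the sequence lies in [0, size)
theorem seq_digits (rows : List String) :
    ∀ v ∈ (bBuild rows).2, 0 ≤ v ∧ v < ((bBuild rows).1.size : Int) := by
  obtain ⟨h1, _, h3, h4, _⟩ := goodState_bBuild rows
  intro v hv
  obtain ⟨j, hj, rfl⟩ := List.mem_iff_getElem.mp hv
  have hj' : j < rows.length := by rw [← h1]; exact hj
  have := h3 j hj'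
  have hg : (bBuild rows).2.getD j 0 = (bBuild rows).2[j] := by
    simp [List.getD, List.getElem?_eq_getElem hj]
  rw [hg] at this
  exact h4 _ _ this

-- id equality reflects row equality
theorem seq_key (rows : List String) (j k : Nat) (hj : j < rows.length) (hk : k < rows.length) :
    ((bBuild rows).2.getD j 0 = (bBuild rows).2.getD k 0) ↔ (rows.getD j "" = rows.getD k "") := by
  obtain ⟨_, _, h3, _, h5⟩ := goodState_bBuild rows
  constructor
  · intro hv
    exact h5 _ _ _ (h3 j hj) (hv ▸ h3 k hk)
  · intro hr
    have := h3 j hj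
    rw [hr] at this
    have := this.symm.trans (h3 k hk)
    exact (Option.some.injEq _ _).mp this.symm |>.symm

-- ---- exact base-B encoding ----

def encFrom (B a : Int) (l : List Int) : Int := l.foldl (fun x v => x * B + v) a

theorem encFrom_cons (B a v : Int) (t : List Int) :
    encFrom B a (v :: t) = encFrom B (a * B + v) t := rfl

theorem encFrom_shift (B : Int) (l : List Int) : ∀ a : Int,
    encFrom B a l = a * B ^ l.length + encFrom B 0 l := by
  induction l with
  | nil => intro a; simp [encFrom]
  | cons v t ih =>
    intro a
    rw [encFrom_cons, ih (a * B + v), encFrom_cons, ih (0 * B + v)]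
    simp [List.length_cons]
    ring

theorem encFrom_append (B a : Int) (xs ys : List Int) :
    encFrom B a (xs ++ ys) = encFrom B a xs * B ^ ys.length + encFrom B 0 ys := by
  unfold encFrom
  rw [List.foldl_append]
  exact encFrom_shift B ys _

theorem enc_bound (B : Int) (l : List Int) (hB : 1 ≤ B)
    (hd : ∀ v ∈ l, 0 ≤ v ∧ v < B) :
    0 ≤ encFrom B 0 l ∧ encFrom B 0 l < B ^ l.length := by
  induction l with
  | nil => simp [encFrom]
  | cons v t ih =>
    have hv := hd v (List.mem_cons_self ..)
    have iht := ih (fun w hw => hd w (List.mem_cons_of_mem _ hw))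
    rw [encFrom_cons, encFrom_shift]
    have hpow : (0:Int) < B ^ t.length := pow_pos (by omega) _
    have hple : B ^ t.length * B = B ^ (v :: t).length := by
      rw [List.length_cons, pow_succ]
    constructor
    · nlinarith [iht.1, hv.1, le_of_lt hpow]
    · have h1 : (0 * B + v) * B ^ t.length ≤ (B - 1) * B ^ t.length := by
        apply mul_le_mul_of_nonneg_right (by omega) (le_of_lt hpow)
      calc (0 * B + v) * B ^ t.length + encFrom B 0 t
          < (B - 1) * B ^ t.length + B ^ t.length := by omega
        _ = B ^ t.length * B := by ring
        _ = B ^ (v :: t).length := hple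

theorem enc_inj (B : Int) (hB : 1 ≤ B) : ∀ (l1 l2 : List Int),
    l1.length = l2.length →
    (∀ v ∈ l1, 0 ≤ v ∧ v < B) → (∀ v ∈ l2, 0 ≤ v ∧ v < B) →
    encFrom B 0 l1 = encFrom B 0 l2 → l1 = l2 := by
  intro l1
  induction l1 with
  | nil =>
    intro l2 hlen _ _ _
    exact (List.eq_nil_of_length_eq_zero hlen.symm).symm
  | cons v t ih =>
    intro l2 hlen hd1 hd2 henc
    cases l2 with
    | nil => simp at hlen
    | cons w s =>
      have hlen' : t.length = s.length := by simpa using hlen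
      have hv := hd1 v (List.mem_cons_self ..)
      have hw := hd2 w (List.mem_cons_self ..)
      have hbt := enc_bound B t hB (fun x hx => hd1 x (List.mem_cons_of_mem _ hx))
      have hbs := enc_bound B s hB (fun x hx => hd2 x (List.mem_cons_of_mem _ hx))
      rw [encFrom_cons, encFrom_cons, encFrom_shift B t, encFrom_shift B s] at henc
      rw [hlen'] at henc hbt
      have hpow : (0:Int) < B ^ s.length := pow_pos (by omega) _
      have hvw : v = w := by
        by_contra hne
        rcases lt_or_gt_of_ne hne with hlt | hlt
        · nlinarith [hbt.1, hbt.2, hbs.1, hbs.2,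
            mul_le_mul_of_nonneg_right (show v + 1 ≤ w by omega) (le_of_lt hpow)]
        · nlinarith [hbt.1, hbt.2, hbs.1, hbs.2,
            mul_le_mul_of_nonneg_right (show w + 1 ≤ v by omega) (le_of_lt hpow)]
      subst hvw
      have hts : encFrom B 0 t = encFrom B 0 s := by linarith
      rw [ih s hlen' (fun x hx => hd1 x (List.mem_cons_of_mem _ hx))
        (fun x hx => hd2 x (List.mem_cons_of_mem _ hx)) hts]

-- ---- A's inner check as a predicate, and A's loop as first-match ----

def aCond (rows : List String) (i : Int) : Bool :=
  aCheck ((((PySem.List.slice? (PySem.List.slice rows none (some i)) none none (-1)).getD []).zip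
    (PySem.List.slice rows (some i) none)))

theorem aLoop_eq_filter (rows : List String) (L : List Int) :
    aLoop rows L = ((L.filter (aCond rows)).headD 0) := by
  induction L with
  | nil => rfl
  | cons i rest ih =>
    show (if aCond rows i = true then i else aLoop rows rest)
      = (((i :: rest).filter (aCond rows)).headD 0)
    rw [List.filter_cons]
    by_cases h : aCond rows i = true
    · rw [if_pos h, if_pos h, List.headD_cons]
    · rw [if_neg h, if_neg h]
      exact ih

-- the mirror condition at line i, stated on the id sequence
def ValidN (s : List Int) (i : Nat) : Prop :=
  (s.take i).reverse.take (min i (s.length - i)) = (s.drop i).take (min i (s.length - i))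

theorem zip_all_iff (A B : List String) :
    ((A.zip B).all (fun p => p.1 == p.2) = true) ↔
      ∀ k : Nat, k < A.length → k < B.length → A.getD k "" = B.getD k "" := by
  rw [List.all_eq_true]
  constructor
  · intro h k h1 h2
    have hk : k < (A.zip B).length := by simp [List.length_zip]; omega
    have := h (A.zip B)[k] (List.getElem_mem hk)
    rw [List.getElem_zip] at this
    have heq : A[k] = B[k] := by simpa using this
    simp [List.getD, List.getElem?_eq_getElem h1, List.getElem?_eq_getElem h2, heq]
  · intro h p hp
    obtain ⟨k, hk, rfl⟩ := List.mem_iff_getElem.mp hp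
    have h1 : k < A.length := by simp [List.length_zip] at hk; omega
    have h2 : k < B.length := by simp [List.length_zip] at hk; omega
    have := h k h1 h2
    simp [List.getD, List.getElem?_eq_getElem h1, List.getElem?_eq_getElem h2] at this
    simp [List.getElem_zip, this]

-- list-of-ids segments equal ↔ rows match around the mirror line
theorem seg_eq_iff (rows : List String) (i m : Nat)
    (hm1 : m ≤ i) (hm2 : i + m ≤ rows.length) :
    (((bBuild rows).2.take i).reverse.take m = ((bBuild rows).2.drop i).take m) ↔
      (∀ k : Nat, k < m → rows.getD (i - 1 - k) "" = rows.getD (i + k) "") := by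
  have hN := seq_length rows
  have hlen1 : (((bBuild rows).2.take i).reverse.take m).length = m := by
    simp [List.length_take, List.length_reverse]; omega
  have hlen2 : (((bBuild rows).2.drop i).take m).length = m := by
    simp [List.length_take, List.length_drop]; omega
  have g1 : ∀ k : Nat, k < m →
      (((bBuild rows).2.take i).reverse.take m).getD k 0 = (bBuild rows).2.getD (i - 1 - k) 0 := by
    intro k hk
    have hk1 : k < (((bBuild rows).2.take i).reverse.take m).length := by omega
    have hk3 : i - 1 - k < (bBuild rows).2.length := by omega
    simp [List.getD, List.getElem?_eq_getElem hk1, List.getElem?_eq_getElem hk3,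
      List.getElem_take, List.getElem_reverse, List.length_take]
    congr 1
    omega
  have g2 : ∀ k : Nat, k < m →
      (((bBuild rows).2.drop i).take m).getD k 0 = (bBuild rows).2.getD (i + k) 0 := by
    intro k hk
    have hk1 : k < (((bBuild rows).2.drop i).take m).length := by omega
    have hk3 : i + k < (bBuild rows).2.length := by omega
    simp [List.getD, List.getElem?_eq_getElem hk1, List.getElem?_eq_getElem hk3,
      List.getElem_take, List.getElem_drop]
  constructor
  · intro he k hk
    have : (((bBuild rows).2.take i).reverse.take m).getD k 0
        = (((bBuild rows).2.drop i).take m).getD k 0 := by rw [he]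
    rw [g1 k hk, g2 k hk] at this
    exact (seq_key rows (i - 1 - k) (i + k) (by omega) (by omega)).mp this
  · intro hr
    apply List.ext_getElem (by omega)
    intro k hk1 hk2
    have hk : k < m := by omega
    have := (seq_key rows (i - 1 - k) (i + k) (by omega) (by omega)).mpr (hr k hk)
    rw [← g1 k hk, ← g2 k hk] at this
    have e1 : (((bBuild rows).2.take i).reverse.take m).getD k 0
        = (((bBuild rows).2.take i).reverse.take m)[k] := by
      simp [List.getD, List.getElem?_eq_getElem hk1]
    have e2 : (((bBuild rows).2.drop i).take m).getD k 0
        = (((bBuild rows).2.drop i).take m)[k] := by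
      simp [List.getD, List.getElem?_eq_getElem hk2]
    rw [e1, e2] at this
    exact this

theorem aCond_iff (rows : List String) (i : Int) (h1 : 1 ≤ i) (h2 : i < (rows.length : Int)) :
    (aCond rows i = true) ↔ ValidN (bBuild rows).2 i.toNat := by
  have hN := seq_length rows
  have hi0 : (0:Int) ≤ i := by omega
  set iN : Nat := i.toNat with hiNdef
  have hiN : 1 ≤ iN ∧ iN < rows.length := by omega
  set mN : Nat := min iN (rows.length - iN) with hmNdef
  have hslice1 : PySem.List.slice rows none (some i) = rows.take iN :=
    PySem.List.slice_to rows hi0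
  have hslice2 : PySem.List.slice rows (some i) none = rows.drop iN :=
    PySem.List.slice_from rows hi0
  have hvn : ValidN (bBuild rows).2 iN ↔
      (((bBuild rows).2.take iN).reverse.take mN = ((bBuild rows).2.drop iN).take mN) := by
    unfold ValidN
    rw [hN]
  rw [hvn, aCond, hslice1, hslice2, PySem.List.slice?_none_none_neg_one, Option.getD_some,
    aCheck_eq_all, zip_all_iff, seg_eq_iff rows iN mN (by omega) (by omega)]
  constructor
  · intro hA k hk
    have hk1 : k < (rows.take iN).reverse.length := by
      simp [List.length_reverse, List.length_take]; omega
    have hk2 : k < (rows.drop iN).length := by simp [List.length_drop]; omega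
    have := hA k (by simpa using hk1) (by simpa using hk2)
    have e1 : ((rows.take iN).reverse.getD k "") = rows.getD (iN - 1 - k) "" := by
      have hlt' : iN - 1 - k < rows.length := by omega
      simp [List.getD, List.getElem?_eq_getElem hk1, List.getElem?_eq_getElem hlt',
        List.getElem_reverse, List.getElem_take, List.length_take]
      congr 1
      omega
    have e2 : ((rows.drop iN).getD k "") = rows.getD (iN + k) "" := by
      have hlt' : iN + k < rows.length := by omega
      simp [List.getD, List.getElem?_eq_getElem hk2, List.getElem?_eq_getElem hlt',
        List.getElem_drop]
    rw [e1, e2] at this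
    exact this
  · intro hr k hk1 hk2
    rw [List.length_reverse, List.length_take] at hk1
    rw [List.length_drop] at hk2
    have hkm : k < mN := by omega
    have := hr k hkm
    have hk1' : k < (rows.take iN).reverse.length := by
      simp [List.length_reverse, List.length_take]; omega
    have hk2' : k < (rows.drop iN).length := by simp [List.length_drop]; omega
    have e1 : ((rows.take iN).reverse.getD k "") = rows.getD (iN - 1 - k) "" := by
      have hlt' : iN - 1 - k < rows.length := by omega
      simp [List.getD, List.getElem?_eq_getElem hk1', List.getElem?_eq_getElem hlt',
        List.getElem_reverse, List.getElem_take, List.length_take]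
      congr 1
      omega
    have e2 : ((rows.drop iN).getD k "") = rows.getD (iN + k) "" := by
      have hlt' : iN + k < rows.length := by omega
      simp [List.getD, List.getElem?_eq_getElem hk2', List.getElem?_eq_getElem hlt',
        List.getElem_drop]
    rw [e1, e2]
    exact this

-- ---- closed forms of the rolling hashes ----

def fwdF (B : Int) (s : List Int) (i : Nat) : Int := encFrom B 0 ((s.drop i).take i)
def bwdF (B : Int) (s : List Int) (i : Nat) : Int := encFrom B 0 ((s.take i).reverse)

theorem enc_pair (B x y : Int) : encFrom B 0 [x, y] = x * B + y := by
  simp [encFrom]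

theorem enc_cons_shift (B x : Int) (l : List Int) :
    encFrom B 0 (x :: l) = x * B ^ l.length + encFrom B 0 l := by
  rw [encFrom_cons, encFrom_shift]
  ring_nf

theorem pyGetD0n (s : List Int) (k : Nat) :
    (PySem.List.pyGet? s ((k : Nat) : Int)).getD 0 = s.getD k 0 := by
  rw [PySem.List.pyGet?_natCast]
  rfl

theorem fwd_step (B : Int) (s : List Int) (i : Nat) (h1 : 1 ≤ i) (h2 : 2 * (i + 1) ≤ s.length) :
    fwdF B s (i + 1) =
      (fwdF B s i - s.getD i 0 * B ^ (i - 1)) * B * B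
        + s.getD (2 * i) 0 * B + s.getD (2 * i + 1) 0 := by
  obtain ⟨j, rfl⟩ : ∃ j, i = j + 1 := ⟨i - 1, by omega⟩
  simp only [Nat.add_sub_cancel]
  have hi : j + 1 < s.length := by omega
  have h2i : 2 * (j + 1) < s.length := by omega
  have h2i1 : 2 * (j + 1) + 1 < s.length := by omega
  have hg : s.getD (j + 1) 0 = s[j + 1] := by simp [List.getD, List.getElem?_eq_getElem hi]
  have hg2 : s.getD (2 * (j + 1)) 0 = s[2 * (j + 1)] := by
    simp [List.getD, List.getElem?_eq_getElem h2i]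
  have hg21 : s.getD (2 * (j + 1) + 1) 0 = s[2 * (j + 1) + 1] := by
    simp [List.getD, List.getElem?_eq_getElem h2i1]
  have d1 : (s.drop (j + 1)).take (j + 1) = s[j + 1] :: ((s.drop (j + 1 + 1)).take j) := by
    rw [List.drop_eq_getElem_cons hi, List.take_succ_cons]
  have d3 : (s.drop (2 * (j + 1))).take 2 = [s[2 * (j + 1)], s[2 * (j + 1) + 1]] := by
    rw [List.drop_eq_getElem_cons h2i, List.drop_eq_getElem_cons h2i1]
    rfl
  have d2 : (s.drop (j + 1 + 1)).take (j + 1 + 1)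
      = ((s.drop (j + 1 + 1)).take j) ++ [s[2 * (j + 1)], s[2 * (j + 1) + 1]] := by
    rw [show j + 1 + 1 = j + 2 from by omega]
    conv_lhs => rw [List.take_add]
    rw [List.drop_drop, show j + 2 + j = 2 * (j + 1) from by omega, d3]
  have hmidlen : ((s.drop (j + 1 + 1)).take j).length = j := by
    have hle : j ≤ s.length - (j + 1 + 1) := by omega
    simp only [List.length_take, List.length_drop, min_eq_left hle]
  have hfwd : fwdF B s (j + 1)
      = s[j + 1] * B ^ j + encFrom B 0 ((s.drop (j + 1 + 1)).take j) := by
    rw [fwdF, d1, enc_cons_shift, hmidlen]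
  rw [fwdF, d2, encFrom_append, hfwd, hg, hg2, hg21, enc_pair]
  simp only [List.length_cons, List.length_nil]
  ring

theorem bwd_step (B : Int) (s : List Int) (i : Nat) (h1 : 1 ≤ i) (hi : i < s.length) :
    bwdF B s (i + 1) = bwdF B s i + s.getD i 0 * B ^ (i - 1) * B := by
  have hg : s.getD i 0 = s[i] := by simp [List.getD, List.getElem?_eq_getElem hi]
  have ht : s.take (i + 1) = s.take i ++ [s[i]] := by
    rw [List.take_add_one, List.getElem?_eq_getElem hi]
    rfl
  have hlen : (s.take i).reverse.length = i := by
    simp [List.length_take]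
    omega
  have hpow : B ^ (i - 1) * B = B ^ i := by
    obtain ⟨i', rfl⟩ : ∃ i', i = i' + 1 := ⟨i - 1, by omega⟩
    simp [pow_succ]
  rw [bwdF, ht, List.reverse_append, List.reverse_singleton, List.singleton_append,
    enc_cons_shift, hlen, bwdF, hg]
  rw [mul_assoc, hpow]
  ring

-- ---- the loop invariant of bLow ----

theorem bLow_inv (s : List Int) (B : Int) (halfN : Nat) (hhalf : 1 ≤ halfN)
    (hlen : 2 * halfN ≤ s.length) :
    ∀ t : Nat, t ≤ halfN →
    (PySem.List.pyRange 1 ((t : Int) + 1) 1).foldl (bStep s B ((halfN : Int)))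
        ([], (PySem.List.pyGet? s 1).getD 0, (PySem.List.pyGet? s 0).getD 0, 1)
      = (((List.range' 1 t).filter (fun i => decide (fwdF B s i = bwdF B s i))).map
            (fun i => ((i : Nat) : Int)),
         fwdF B s (min (t + 1) halfN), bwdF B s (min (t + 1) halfN),
         B ^ (min (t + 1) halfN - 1)) := by
  intro t
  induction t with
  | zero =>
    intro _
    have hr : PySem.List.pyRange 1 (((0 : Nat) : Int) + 1) 1 = [] :=
      PySem.List.pyRange_one_eq_nil (by norm_num)
    rw [hr]
    have hm : min (0 + 1) halfN = 1 := by omega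
    rw [hm]
    have h0 : (0:Nat) < s.length := by omega
    have h1 : (1:Nat) < s.length := by omega
    have e1 : (PySem.List.pyGet? s 1).getD 0 = fwdF B s 1 := by
      have hp : (PySem.List.pyGet? s 1).getD 0 = s.getD 1 0 := pyGetD0n s 1
      have hd : (s.drop 1).take 1 = [s[1]] := by
        rw [List.drop_eq_getElem_cons h1, List.take_succ_cons, List.take_zero]
      rw [hp, fwdF, hd]
      simp [encFrom, List.getD, List.getElem?_eq_getElem h1]
    have e0 : (PySem.List.pyGet? s 0).getD 0 = bwdF B s 1 := by
      have hp : (PySem.List.pyGet? s 0).getD 0 = s.getD 0 0 := pyGetD0n s 0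
      have hd : (s.take 1).reverse = [s[0]] := by
        cases s with
        | nil => simp at h0
        | cons a t => rfl
      rw [hp, bwdF, hd]
      simp [encFrom, List.getD, List.getElem?_eq_getElem h0]
    simp [List.foldl_nil, e1, e0]
  | succ t ih =>
    intro ht
    have ht' : t ≤ halfN := by omega
    have hcast : (((t + 1 : Nat)) : Int) + 1 = ((t : Int) + 1) + 1 := by push_cast; ring
    rw [hcast, PySem.List.pyRange_one_succ_right (by omega : (1:Int) ≤ (t : Int) + 1),
      List.foldl_append, ih ht', List.foldl_cons, List.foldl_nil]
    have hmt : min (t + 1) halfN = t + 1 := by omega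
    rw [hmt]
    unfold bStep
    simp only
    have hrange : List.range' 1 (t + 1) = List.range' 1 t ++ [1 + t] := by
      simpa using List.range'_concat (s := 1) (n := t) (step := 1)
    rw [hrange, List.filter_append, List.map_append]
    have h1t : (1 + t) = t + 1 := by omega
    by_cases hc : fwdF B s (t + 1) = bwdF B s (t + 1)
    · rw [if_pos hc]
      have hfilter : (List.filter (fun i => decide (fwdF B s i = bwdF B s i)) [1 + t]) = [t + 1] := by
        rw [h1t]
        simp [List.filter, hc]
      rw [hfilter]
      by_cases hlt : t + 1 < halfN
      · rw [if_pos (by exact_mod_cast (by omega : (t:Int) + 1 < (halfN : Int)))]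
        have hm2 : min (t + 1 + 1) halfN = t + 2 := by omega
        rw [hm2]
        have hgi : ((t : Int) + 1) = (((t + 1 : Nat)) : Int) := by push_cast; ring
        have hg2i : 2 * ((t : Int) + 1) = (((2 * (t + 1) : Nat)) : Int) := by push_cast; ring
        have hg2i1 : 2 * ((t : Int) + 1) + 1 = (((2 * (t + 1) + 1 : Nat)) : Int) := by push_cast; ring
        rw [hg2i1, hg2i, hgi, pyGetD0n s (2 * (t + 1) + 1), pyGetD0n s (2 * (t + 1)),
          pyGetD0n s (t + 1)]
        rw [fwd_step B s (t + 1) (by omega) (by omega),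
          bwd_step B s (t + 1) (by omega) (by omega)]
        have hsub : t + 1 - 1 = t := by omega
        have hpw : B ^ t * B = B ^ (t + 2 - 1) := by
          rw [show t + 2 - 1 = t + 1 from by omega, pow_succ]
        rw [hsub, hpw]
        simp
      · rw [if_neg (by exact_mod_cast (by omega : ¬ ((t:Int) + 1 < (halfN : Int))))]
        have hm2 : min (t + 1 + 1) halfN = t + 1 := by omega
        rw [hm2]
        simp
    · rw [if_neg hc]
      have hfilter : (List.filter (fun i => decide (fwdF B s i = bwdF B s i)) [1 + t]) = [] := by
        rw [h1t]
        simp [List.filter, hc]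
      rw [hfilter]
      by_cases hlt : t + 1 < halfN
      · rw [if_pos (by exact_mod_cast (by omega : (t:Int) + 1 < (halfN : Int)))]
        have hm2 : min (t + 1 + 1) halfN = t + 2 := by omega
        rw [hm2]
        have hgi : ((t : Int) + 1) = (((t + 1 : Nat)) : Int) := by push_cast; ring
        have hg2i : 2 * ((t : Int) + 1) = (((2 * (t + 1) : Nat)) : Int) := by push_cast; ring
        have hg2i1 : 2 * ((t : Int) + 1) + 1 = (((2 * (t + 1) + 1 : Nat)) : Int) := by push_cast; ring
        rw [hg2i1, hg2i, hgi, pyGetD0n s (2 * (t + 1) + 1), pyGetD0n s (2 * (t + 1)),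
          pyGetD0n s (t + 1)]
        rw [fwd_step B s (t + 1) (by omega) (by omega),
          bwd_step B s (t + 1) (by omega) (by omega)]
        have hsub : t + 1 - 1 = t := by omega
        have hpw : B ^ t * B = B ^ (t + 2 - 1) := by
          rw [show t + 2 - 1 = t + 1 from by omega, pow_succ]
        rw [hsub, hpw]
        simp
      · rw [if_neg (by exact_mod_cast (by omega : ¬ ((t:Int) + 1 < (halfN : Int))))]
        have hm2 : min (t + 1 + 1) halfN = t + 1 := by omega
        rw [hm2]
        simp

theorem bLow_eq (s : List Int) (B : Int) :
    bLow s ((s.length : Int)) B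
      = ((List.range' 1 (s.length / 2)).filter
          (fun i => decide (fwdF B s i = bwdF B s i))).map (fun i => ((i : Nat) : Int)) := by
  have hf : PySem.Int.floordiv ((s.length : Int)) 2 = ((s.length / 2 : Nat) : Int) := by
    exact_mod_cast PySem.Int.floordiv_natCast s.length 2
  by_cases h : 1 ≤ s.length / 2
  · have := bLow_inv s B (s.length / 2) h (by omega) (s.length / 2) le_rfl
    unfold bLow
    rw [hf, if_pos (by exact_mod_cast h), this]
  · have h0 : s.length / 2 = 0 := by omega
    unfold bLow
    rw [hf, h0, if_neg (by norm_num)]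
    simp

theorem valid_iff_enc (s : List Int) (B : Int) (hB : 1 ≤ B)
    (hdig : ∀ v ∈ s, 0 ≤ v ∧ v < B) (i : Nat) (h1 : 1 ≤ i) (h2 : 2 * i ≤ s.length) :
    (fwdF B s i = bwdF B s i) ↔ ((s.take i).reverse = (s.drop i).take i) := by
  constructor
  · intro he
    have hlen : ((s.take i).reverse).length = ((s.drop i).take i).length := by
      simp [List.length_reverse, List.length_take, List.length_drop]
      omega
    refine enc_inj B hB _ _ hlen ?_ ?_ he.symm
    · intro v hv
      exact hdig v (List.mem_of_mem_take (List.mem_reverse.mp hv))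
    · intro v hv
      exact hdig v (List.mem_of_mem_drop (List.mem_of_mem_take hv))
  · intro he
    rw [fwdF, bwdF, he]

theorem mem_bLow (s : List Int) (B : Int) (hB : 1 ≤ B)
    (hdig : ∀ v ∈ s, 0 ≤ v ∧ v < B) (x : Int) :
    x ∈ bLow s ((s.length : Int)) B ↔
      ∃ i : Nat, 1 ≤ i ∧ 2 * i ≤ s.length ∧ x = (i : Int) ∧
        (s.take i).reverse = (s.drop i).take i := by
  rw [bLow_eq]
  simp only [List.mem_map, List.mem_filter, List.mem_range'_1, decide_eq_true_eq]
  constructor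
  · rintro ⟨i, ⟨⟨hi1, hi2⟩, hcond⟩, rfl⟩
    have h2i : 2 * i ≤ s.length := by omega
    exact ⟨i, hi1, h2i, rfl, (valid_iff_enc s B hB hdig i hi1 h2i).mp hcond⟩
  · rintro ⟨i, hi1, h2i, rfl, hv⟩
    exact ⟨i, ⟨⟨hi1, by omega⟩, (valid_iff_enc s B hB hdig i hi1 h2i).mpr hv⟩, rfl⟩

-- the lower-half mirror condition, and its reflection to the upper half
theorem low_valid_iff (s : List Int) (i : Nat) (_h1 : 1 ≤ i) (h2 : 2 * i ≤ s.length) :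
    ((s.take i).reverse = (s.drop i).take i) ↔ ValidN s i := by
  unfold ValidN
  have hm : min i (s.length - i) = i := by omega
  rw [hm]
  have ht : (s.take i).reverse.take i = (s.take i).reverse := by
    apply List.take_of_length_le
    simp [List.length_take]
  rw [ht]

theorem rev_valid_iff (s : List Int) (j : Nat) (_h1 : 1 ≤ j) (h2 : 2 * j ≤ s.length) :
    ((s.reverse.take j).reverse = (s.reverse.drop j).take j) ↔ ValidN s (s.length - j) := by
  unfold ValidN
  have hm : min (s.length - j) (s.length - (s.length - j)) = j := by omega
  rw [hm]
  have e1 : s.reverse.take j = (s.drop (s.length - j)).reverse := by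
    rw [List.take_reverse]
  have e2 : s.reverse.drop j = (s.take (s.length - j)).reverse := by
    rw [List.drop_reverse]
  have e3 : (s.drop (s.length - j)).take j = s.drop (s.length - j) := by
    apply List.take_of_length_le
    simp [List.length_drop]
    omega
  rw [e1, e2, List.reverse_reverse, e3]
  constructor
  · intro h
    rw [← h]
  · intro h
    rw [← h]

-- ---- final assembly ----

theorem min?_spec (l : List Int) (hl : l ≠ []) :
    ∃ m, PySem.List.min? l (fun x => x) = some m ∧ m ∈ l ∧ ∀ y ∈ l, m ≤ y := by
  obtain ⟨m, hm⟩ : ∃ m, PySem.List.min? l (fun x => x) = some m := by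
    cases h : PySem.List.min? l (fun x => x) with
    | none => exact absurd ((PySem.List.min?_eq_none_iff _ _).mp h) hl
    | some m => exact ⟨m, rfl⟩
  exact ⟨m, hm, PySem.List.min?_mem hm, fun y hy => PySem.List.min?_isMin hm y hy⟩

-- ===== VERDICT (by name: the statement is the Claim_ definition above) =====
theorem get_pat_value_spec : Claim_equal_get_pat_value := by
  intro rows _
  show get_pat_value rows = get_pat_value_alt rows
  unfold get_pat_value get_pat_value_alt
  show aLoop rows (PySem.List.pyRange 1 ((rows.length : Int)) 1) =
    (match PySem.List.min?
        (bLow (bBuild rows).2 (((bBuild rows).2.length : Int)) (((bBuild rows).1.size : Int) + 1)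
          ++ (bLow (bBuild rows).2.reverse (((bBuild rows).2.length : Int))
                (((bBuild rows).1.size : Int) + 1)).map
              (fun j => (((bBuild rows).2.length : Int)) - j))
        (fun x => x) with
      | some m => m
      | none => 0)
  have hN := seq_length rows
  set nN : Nat := rows.length with hnN
  set Bv : Int := ((bBuild rows).1.size : Int) + 1 with hBv
  have hB1 : 1 ≤ Bv := by
    have := Int.natCast_nonneg ((bBuild rows).1.size)
    omega
  have hdig : ∀ v ∈ (bBuild rows).2, 0 ≤ v ∧ v < Bv := by
    intro v hv
    have := seq_digits rows v hv
    omega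
  have hdigr : ∀ v ∈ (bBuild rows).2.reverse, 0 ≤ v ∧ v < Bv := by
    intro v hv
    exact hdig v (List.mem_reverse.mp hv)
  rw [aLoop_eq_filter]
  set cands : List Int :=
    bLow (bBuild rows).2 (((bBuild rows).2.length : Int)) Bv
      ++ (bLow (bBuild rows).2.reverse (((bBuild rows).2.length : Int)) Bv).map
          (fun j => (((bBuild rows).2.length : Int)) - j) with hcands
  -- both the filtered range and cands carve out the same set of mirror indices
  have hVmem : ∀ x : Int, x ∈ (PySem.List.pyRange 1 ((nN : Int)) 1).filter (aCond rows) ↔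
      ∃ iN : Nat, 1 ≤ iN ∧ iN < nN ∧ x = (iN : Int) ∧ ValidN (bBuild rows).2 iN := by
    intro x
    rw [List.mem_filter, PySem.List.mem_pyRange_one]
    constructor
    · rintro ⟨⟨hx1, hx2⟩, hcond⟩
      refine ⟨x.toNat, by omega, by omega, by omega, ?_⟩
      exact (aCond_iff rows x hx1 hx2).mp hcond
    · rintro ⟨iN, h1, h2, rfl, hvalid⟩
      have hx1 : (1:Int) ≤ (iN : Int) := by exact_mod_cast h1
      have hx2 : (iN : Int) < (nN : Int) := by exact_mod_cast h2
      refine ⟨⟨hx1, hx2⟩, ?_⟩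
      apply (aCond_iff rows (iN : Int) hx1 hx2).mpr
      simpa using hvalid
  have hrevlen : (bBuild rows).2.reverse.length = nN := by simp [hN]
  have hCmem : ∀ x : Int, x ∈ cands ↔
      ∃ iN : Nat, 1 ≤ iN ∧ iN < nN ∧ x = (iN : Int) ∧ ValidN (bBuild rows).2 iN := by
    intro x
    rw [hcands, List.mem_append]
    constructor
    · rintro (hx | hx)
      · obtain ⟨i, h1, h2, rfl, hv⟩ := (mem_bLow (bBuild rows).2 Bv hB1 hdig x).mp hx
        rw [hN] at h2
        exact ⟨i, h1, by omega, rfl,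
          (low_valid_iff _ i h1 (by rw [hN]; omega : 2 * i ≤ (bBuild rows).2.length)).mp hv⟩
      · obtain ⟨j', hj', rfl⟩ := List.mem_map.mp hx
        have hj'' : j' ∈ bLow (bBuild rows).2.reverse (((bBuild rows).2.reverse.length : Int)) Bv := by
          rw [hrevlen, ← hN]
          exact hj'
        obtain ⟨j, h1, h2, rfl, hv⟩ := (mem_bLow (bBuild rows).2.reverse Bv hB1 hdigr j').mp hj''
        rw [hrevlen] at h2
        refine ⟨nN - j, by omega, by omega, by rw [hN]; omega, ?_⟩
        have := (rev_valid_iff (bBuild rows).2 j h1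
          (by rw [hN]; omega : 2 * j ≤ (bBuild rows).2.length)).mp hv
        rwa [hN] at this
    · rintro ⟨iN, h1, h2, rfl, hvalid⟩
      by_cases hlow : 2 * iN ≤ nN
      · left
        apply (mem_bLow (bBuild rows).2 Bv hB1 hdig _).mpr
        exact ⟨iN, h1, by rw [hN]; omega, rfl,
          (low_valid_iff _ iN h1 (by rw [hN]; omega : 2 * iN ≤ (bBuild rows).2.length)).mpr hvalid⟩
      · right
        apply List.mem_map.mpr
        refine ⟨((nN - iN : Nat) : Int), ?_, by rw [hN]; omega⟩
        have hgoal : ((nN - iN : Nat) : Int) ∈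
            bLow (bBuild rows).2.reverse (((bBuild rows).2.reverse.length : Int)) Bv := by
          apply (mem_bLow (bBuild rows).2.reverse Bv hB1 hdigr _).mpr
          refine ⟨nN - iN, by omega, by rw [hrevlen]; omega, rfl, ?_⟩
          apply (rev_valid_iff (bBuild rows).2 (nN - iN) (by omega)
            (by rw [hN]; omega : 2 * (nN - iN) ≤ (bBuild rows).2.length)).mpr
          have he : (bBuild rows).2.length - (nN - iN) = iN := by rw [hN]; omega
          rwa [he]
        rw [hrevlen] at hgoal
        have hc : ((nN : Nat) : Int) = (((bBuild rows).2.length : Nat) : Int) := by rw [hN]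
        rw [hc] at hgoal
        exact hgoal
  have hVsorted : ((PySem.List.pyRange 1 ((nN : Int)) 1).filter (aCond rows)).Pairwise (· < ·) :=
    (PySem.List.pairwise_lt_pyRange_one 1 ((nN : Int))).filter _
  rcases hVc : (PySem.List.pyRange 1 ((nN : Int)) 1).filter (aCond rows) with _ | ⟨v, rest⟩
  · -- no mirror line at all: both sides give 0
    have hcnil : cands = [] := by
      apply List.eq_nil_iff_forall_not_mem.mpr
      intro x hx
      have := (hVmem x).mpr ((hCmem x).mp hx)
      rw [hVc] at this
      exact List.not_mem_nil this
    have hmn : PySem.List.min? ([] : List Int) (fun x : Int => x) = none :=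
      (PySem.List.min?_eq_none_iff _ _).mpr rfl
    rw [hcnil, hmn]
    rfl
  · -- first mirror line v: the minimum of cands is v
    have hvV : v ∈ (PySem.List.pyRange 1 ((nN : Int)) 1).filter (aCond rows) := by
      rw [hVc]
      exact List.mem_cons_self ..
    have hvC : v ∈ cands := (hCmem v).mpr ((hVmem v).mp hvV)
    have hcne : cands ≠ [] := fun h => by
      rw [h] at hvC
      exact List.not_mem_nil hvC
    obtain ⟨m, hm, hmem, hmin⟩ := min?_spec cands hcne
    rw [hm, List.headD_cons]
    show v = m
    have h1 : m ≤ v := hmin v hvC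
    have hmV : m ∈ v :: rest := by
      have := (hVmem m).mpr ((hCmem m).mp hmem)
      rwa [hVc] at this
    have hsorted' : (v :: rest).Pairwise (· < ·) := by
      rw [hVc] at hVsorted
      exact hVsorted
    have h2 : v ≤ m := by
      rcases List.mem_cons.mp hmV with rfl | hmr
      · exact le_refl _
      · exact le_of_lt ((List.pairwise_cons.mp hsorted').1 m hmr)
    omega
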